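-- pv_equiv track=rewrite | github.com/adacher/computorv1 | computor.py | add_same_degree
-- ===== SOURCE A (Python) =====
-- def add_same_degree(matrix):
--     matrix.sort()
--     values = []
--     for elem in matrix:
--         found = False
--         for elem2 in values:
--             if elem2:
--                 if elem2[0] == elem[0]:
--                     elem2[1] = elem2[1] + elem[1]
--                     found = True
--                     break
--         if found == False:
--             values.append(elem)
--     return values
-- ===== SOURCE B (Python) =====
-- def add_same_degree(matrix):
--     matrix.sort()
--     values = []
--     for elem in matrix:
--         if values and values[-1] and elem and values[-1][0] == elem[0]:
--             values[-1][1] += elem[1]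
--         else:
--             values.append(elem)
--     return values
-- ===== Notes on version B (the rewrite author's own statement) =====
-- stated objective: simpler
-- what changed: B drops A's 'found' flag and inner scan over all accumulated groups, instead comparing each element only against the last group (valid because the list was just sorted, so equal degrees are adjacent).
import Mathlib
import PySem

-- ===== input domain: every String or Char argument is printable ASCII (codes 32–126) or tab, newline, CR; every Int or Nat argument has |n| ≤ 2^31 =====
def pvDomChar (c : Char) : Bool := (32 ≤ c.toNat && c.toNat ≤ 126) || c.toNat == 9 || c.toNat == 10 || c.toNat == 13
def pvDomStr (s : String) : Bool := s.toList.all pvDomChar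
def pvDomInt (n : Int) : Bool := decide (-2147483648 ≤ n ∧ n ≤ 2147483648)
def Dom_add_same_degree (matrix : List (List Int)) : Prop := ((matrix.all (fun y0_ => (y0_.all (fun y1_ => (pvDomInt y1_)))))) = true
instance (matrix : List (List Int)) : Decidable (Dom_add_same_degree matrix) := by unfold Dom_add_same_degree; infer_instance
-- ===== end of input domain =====

-- B replaces A's inner linear scan over all groups by a single adjacent-to-last comparison, which
-- is valid because the list is sorted; equivalence is about the RETURN value (both Pythons sort the
-- argument in place and mutate its inner lists identically).

-- ===== PORT A =====
-- Python's `matrix.sort()` = lexicographic sort of int lists: PySem.List.sorted under the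
-- lexicographic order on List Int (Mathlib's linear order on lists, written explicitly so the
-- order lemmas apply).  elem2[1]/elem[1] are ported with pyGetD/pySetD; the inputs on which
-- Python raises IndexError there are exactly the ones excluded by Pre_ below.
def asdSort (xs : List (List Int)) : List (List Int) :=
  @PySem.List.sorted (List Int) (List Int) List.instLinearOrder.toLT LinearOrder.toDecidableLT
    xs (fun x => x) false

-- inner `for elem2 in values` loop of A: first truthy entry with elem2[0] == elem[0] gets
-- elem2[1] += elem[1] (then break); `none` = no match (found == False)
def asdFind (elem : List Int) : List (List Int) → Option (List (List Int))
  | [] => none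
  | v :: vs =>
    if v ≠ [] ∧ PySem.List.pyGetD v 0 0 = PySem.List.pyGetD elem 0 0 then
      some (PySem.List.pySetD v 1 (PySem.List.pyGetD v 1 0 + PySem.List.pyGetD elem 1 0) :: vs)
    else (asdFind elem vs).map (v :: ·)

-- body of A's outer loop
def asdStepA (values : List (List Int)) (elem : List Int) : List (List Int) :=
  match asdFind elem values with
  | some values' => values'
  | none => values ++ [elem]

def add_same_degree (matrix : List (List Int)) : List (List Int) :=
  (asdSort matrix).foldl asdStepA []

-- ===== PORT B =====
-- body of B's single loop: compare only with values[-1]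
def asdStep (values : List (List Int)) (elem : List Int) : List (List Int) :=
  match values.getLast? with
  | some last =>
    if last ≠ [] ∧ elem ≠ [] ∧ PySem.List.pyGetD last 0 0 = PySem.List.pyGetD elem 0 0 then
      values.dropLast ++
        [PySem.List.pySetD last 1 (PySem.List.pyGetD last 1 0 + PySem.List.pyGetD elem 1 0)]
    else values ++ [elem]
  | none => values ++ [elem]

def add_same_degree_alt (matrix : List (List Int)) : List (List Int) :=
  (asdSort matrix).foldl asdStep []

-- ===== PRECONDITION & SPEC =====
-- Pre_ excludes exactly the inputs on which Python A raises IndexError: a length-1 inner list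
-- whose head is shared by a second nonempty inner list (the merge then reads index 1 of a
-- singleton).  On every other input A returns normally.
def Pre_add_same_degree (matrix : List (List Int)) : Prop :=
  ∀ l ∈ matrix, l.length = 1 →
    matrix.countP
      (fun m => !m.isEmpty && (PySem.List.pyGetD m 0 0 == PySem.List.pyGetD l 0 0)) ≤ 1
instance (matrix : List (List Int)) : Decidable (Pre_add_same_degree matrix) := by
  unfold Pre_add_same_degree; infer_instance

def pvWitness_add_same_degree : List (List Int) := [[1, 2], [1, 3], [0]]

def Spec_add_same_degree (matrix : List (List Int)) (out : List (List Int)) : Prop := out = add_same_degree_alt matrix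
instance (matrix : List (List Int)) (out : List (List Int)) : Decidable (Spec_add_same_degree matrix out) := by unfold Spec_add_same_degree; infer_instance

-- ===== CLAIM (what is proved, stated in full; the proofs are below) =====
def Claim_equal_add_same_degree : Prop := ∀ (matrix : List (List Int)), Dom_add_same_degree matrix → Pre_add_same_degree matrix → Spec_add_same_degree matrix (add_same_degree matrix)

-- ===== LEMMAS AND PROOFS =====

lemma asdHead_cons (a : Int) (t : List Int) : PySem.List.pyGetD (a :: t) 0 0 = a := by
  simp [pysem]

-- setting index 1 leaves index 0 unchanged (also on short lists, where pySetD is the identity)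
lemma asdHead_set (l : List Int) (w : Int) :
    PySem.List.pyGetD (PySem.List.pySetD l 1 w) 0 0 = PySem.List.pyGetD l 0 0 := by
  match l with
  | [] => rfl
  | [a] => rfl
  | a :: b :: t =>
    simp [PySem.List.pySetD, PySem.List.pySet?, PySem.List.pyIdx?, pysem]

lemma asdLex_nil {x : List Int} (h : List.Lex (· < ·) x [] ∨ x = []) : x = [] := by
  rcases h with h | h
  · cases h
  · exact h

lemma asdLex_head {x y : List Int} (hx : x ≠ [])
    (h : List.Lex (· < ·) x y ∨ x = y) :
    PySem.List.pyGetD x 0 0 ≤ PySem.List.pyGetD y 0 0 := by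
  rcases h with h | rfl
  · cases h with
    | nil => exact absurd rfl hx
    | @cons a l₁ l₂ h' => simp
    | @rel a l₁ b l₂ h' => rw [asdHead_cons, asdHead_cons]; exact le_of_lt h'
  · exact le_rfl

lemma asdFind_none (elem : List Int) (values : List (List Int))
    (h : ∀ v ∈ values, v ≠ [] → PySem.List.pyGetD v 0 0 ≠ PySem.List.pyGetD elem 0 0) :
    asdFind elem values = none := by
  induction values with
  | nil => rfl
  | cons v vs ih =>
    rw [asdFind, if_neg, ih]
    · rfl
    · exact fun w hw hne => h w (List.mem_cons_of_mem _ hw) hne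
    · rintro ⟨h1, h2⟩; exact h v List.mem_cons_self h1 h2

lemma asdFind_concat (elem last : List Int) (values : List (List Int))
    (hlast : last ≠ [])
    (heq : PySem.List.pyGetD last 0 0 = PySem.List.pyGetD elem 0 0)
    (h : ∀ v ∈ values, v ≠ [] → PySem.List.pyGetD v 0 0 ≠ PySem.List.pyGetD elem 0 0) :
    asdFind elem (values ++ [last]) =
      some (values ++
        [PySem.List.pySetD last 1 (PySem.List.pyGetD last 1 0 + PySem.List.pyGetD elem 1 0)]) := by
  induction values with
  | nil => simp [asdFind, hlast, heq]
  | cons v vs ih =>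
    rw [List.cons_append, asdFind, if_neg, ih]
    · rfl
    · exact fun w hw hne => h w (List.mem_cons_of_mem _ hw) hne
    · rintro ⟨h1, h2⟩; exact h v List.mem_cons_self h1 h2

-- the loop invariant relating A's state to the tail still to be processed:
-- (1) no entry before the last can ever match a future element's head,
-- (2) if an empty list is still to come, every entry so far is empty,
-- (3) every nonempty entry's head is ≤ every future nonempty element's head
def asdInv (values s : List (List Int)) : Prop :=
  (∀ v ∈ values.dropLast, v ≠ [] → ∀ x ∈ s, x ≠ [] →
      PySem.List.pyGetD v 0 0 ≠ PySem.List.pyGetD x 0 0) ∧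
  ([] ∈ s → ∀ v ∈ values, v = []) ∧
  (∀ v ∈ values, v ≠ [] → ∀ x ∈ s, x ≠ [] →
      PySem.List.pyGetD v 0 0 ≤ PySem.List.pyGetD x 0 0)

lemma asdStep_eq (x : List Int) (s' values : List (List Int))
    (hx : ∀ y ∈ s', List.Lex (· < ·) x y ∨ x = y)
    (hinv : asdInv values (x :: s')) :
    asdStepA values x = asdStep values x ∧ asdInv (asdStep values x) s' := by
  obtain ⟨ha, hb, hc⟩ := hinv
  by_cases hx0 : x = []
  · subst hx0
    have hall : ∀ v ∈ values, v = [] := hb List.mem_cons_self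
    have hfind : asdFind [] values = none :=
      asdFind_none _ _ (fun v hv hne => absurd (hall v hv) hne)
    have hstepA : asdStepA values [] = values ++ [[]] := by
      rw [asdStepA, hfind]
    have hstepB : asdStep values [] = values ++ [[]] := by
      rw [asdStep]
      cases hl : values.getLast? with
      | none => rfl
      | some last =>
        have : last = [] := hall last (List.mem_of_getLast? hl)
        simp [this]
    refine ⟨by rw [hstepA, hstepB], ?_, ?_, ?_⟩ <;> rw [hstepB]
    · intro v hv hne
      rw [List.dropLast_concat] at hv
      exact absurd (hall v hv) hne
    · intro _ v hv
      rcases List.mem_append.mp hv with hv | hv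
      · exact hall v hv
      · simpa using hv
    · intro v hv hne
      rcases List.mem_append.mp hv with hv | hv
      · exact absurd (hall v hv) hne
      · simp at hv; exact absurd hv hne
  · have hs'ne : ∀ y ∈ s', y ≠ [] := by
      intro y hy hy0
      subst hy0
      exact hx0 (asdLex_nil (hx [] hy))
    have hhead : ∀ y ∈ s', PySem.List.pyGetD x 0 0 ≤ PySem.List.pyGetD y 0 0 :=
      fun y hy => asdLex_head hx0 (hx y hy)
    rcases List.eq_nil_or_concat values with rfl | ⟨ys, y, rfl⟩
    · refine ⟨rfl, ?_, ?_, ?_⟩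
      · intro v hv
        simp [asdStep] at hv
      · intro h
        exact absurd rfl (hs'ne [] h)
      · intro v hv hne x' hx' hx'ne
        simp [asdStep] at hv
        subst hv
        exact hhead x' hx'
    · simp only [List.concat_eq_append] at ha hb hc ⊢
      have hdrop : (ys ++ [y]).dropLast = ys := List.dropLast_concat
      have hlastq : (ys ++ [y]).getLast? = some y := List.getLast?_concat
      rw [hdrop] at ha
      by_cases hm : y ≠ [] ∧ PySem.List.pyGetD y 0 0 = PySem.List.pyGetD x 0 0
      · have hstepA : asdStepA (ys ++ [y]) x =
            ys ++ [PySem.List.pySetD y 1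
              (PySem.List.pyGetD y 1 0 + PySem.List.pyGetD x 1 0)] := by
          rw [asdStepA, asdFind_concat x y ys hm.1 hm.2
            (fun v hv hne => ha v hv hne x List.mem_cons_self hx0)]
        have hstepB : asdStep (ys ++ [y]) x =
            ys ++ [PySem.List.pySetD y 1
              (PySem.List.pyGetD y 1 0 + PySem.List.pyGetD x 1 0)] := by
          simp only [asdStep, hlastq]
          rw [if_pos ⟨hm.1, hx0, hm.2⟩, hdrop]
        rw [hstepB]
        refine ⟨hstepA, ?_, ?_, ?_⟩
        · intro v hv hne x' hx' hx'ne
          rw [List.dropLast_concat] at hv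
          exact ha v hv hne x' (List.mem_cons_of_mem _ hx') hx'ne
        · intro h; exact absurd rfl (hs'ne [] h)
        · intro v hv hne x' hx' hx'ne
          rcases List.mem_append.mp hv with hv | hv
          · exact hc v (List.mem_append_left _ hv) hne x' (List.mem_cons_of_mem _ hx') hx'ne
          · simp only [List.mem_singleton] at hv
            subst hv
            rw [asdHead_set]
            exact hc y (List.mem_append_right _ (List.mem_singleton.mpr rfl)) hm.1
              x' (List.mem_cons_of_mem _ hx') hx'ne
      · have hally : ∀ v ∈ ys ++ [y], v ≠ [] →
            PySem.List.pyGetD v 0 0 ≠ PySem.List.pyGetD x 0 0 := by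
          intro v hv hne
          rcases List.mem_append.mp hv with hv | hv
          · exact ha v hv hne x List.mem_cons_self hx0
          · simp only [List.mem_singleton] at hv
            subst hv
            intro heq
            exact hm ⟨hne, heq⟩
        have hstepA : asdStepA (ys ++ [y]) x = (ys ++ [y]) ++ [x] := by
          rw [asdStepA, asdFind_none x _ hally]
        have hstepB : asdStep (ys ++ [y]) x = (ys ++ [y]) ++ [x] := by
          simp only [asdStep, hlastq]
          rw [if_neg]
          rintro ⟨h1, _, h3⟩
          exact hm ⟨h1, h3⟩
        rw [hstepB]
        refine ⟨hstepA, ?_, ?_, ?_⟩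
        · intro v hv hne x' hx' hx'ne
          rw [List.dropLast_concat] at hv
          rcases List.mem_append.mp hv with hv | hv
          · exact ha v hv hne x' (List.mem_cons_of_mem _ hx') hx'ne
          · simp only [List.mem_singleton] at hv
            subst hv
            have h1 : PySem.List.pyGetD v 0 0 ≤ PySem.List.pyGetD x 0 0 :=
              hc v (List.mem_append_right _ (List.mem_singleton.mpr rfl)) hne
                x List.mem_cons_self hx0
            have h2 : PySem.List.pyGetD v 0 0 ≠ PySem.List.pyGetD x 0 0 :=
              hally v (List.mem_append_right _ (List.mem_singleton.mpr rfl)) hne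
            have h3 := hhead x' hx'
            omega
        · intro h; exact absurd rfl (hs'ne [] h)
        · intro v hv hne x' hx' hx'ne
          rcases List.mem_append.mp hv with hv | hv
          · exact hc v hv hne x' (List.mem_cons_of_mem _ hx') hx'ne
          · simp only [List.mem_singleton] at hv
            subst hv
            exact hhead x' hx'

lemma asdLoop (s : List (List Int)) :
    ∀ values : List (List Int),
      s.Pairwise (fun a b => List.Lex (· < ·) a b ∨ a = b) →
      asdInv values s →
      s.foldl asdStepA values = s.foldl asdStep values := by
  induction s with
  | nil => intro values _ _; rfl
  | cons x s' ih =>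
    intro values hp hinv
    rw [List.pairwise_cons] at hp
    obtain ⟨heq, hinv'⟩ := asdStep_eq x s' values hp.1 hinv
    rw [List.foldl_cons, List.foldl_cons, heq]
    exact ih _ hp.2 hinv'

lemma asdSort_pairwise (xs : List (List Int)) :
    (asdSort xs).Pairwise (fun a b => List.Lex (· < ·) a b ∨ a = b) := by
  have h := PySem.List.sorted_pairwise
    (κ := List Int) xs (fun x => x)
  refine List.Pairwise.imp ?_ h
  intro a b hab
  exact le_iff_lt_or_eq.mp hab

-- ===== VERDICT (by name: the statement is the Claim_ definition above) =====
theorem add_same_degree_spec : Claim_equal_add_same_degree := by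
  intro matrix _ _
  unfold Spec_add_same_degree add_same_degree add_same_degree_alt
  exact asdLoop (asdSort matrix) [] (asdSort_pairwise matrix)
    ⟨by simp, fun _ v hv => absurd hv (List.not_mem_nil), by simp⟩
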